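-- pv_equiv track=rewrite | github.com/evanunnink22/ComputerScience | Paper_code_final.py | words_titles
-- ===== SOURCE A (Python) =====
-- def words_titles(title):
--     title_sep = []
--     for i in range(len(title)):
--         title_part = title[i].split()
--         title_sep.append(title_part)
--     words_in_title = []
--     #Create list with all individual words
--     for index in title_sep:
--         for j in index:
--                 words_in_title.append(j)
--     return words_in_title
-- ===== SOURCE B (Python) =====
-- def words_titles(title):
--     # Character-level scan: never calls str.split(); builds each word from
--     # its characters, flushing on whitespace, directly into the flat output.
--     out = []
--     for t in title:
--         cur = []
--         for c in t:
--             if c.isspace():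
--                 if cur:
--                     out.append(''.join(cur))
--                     cur = []
--             else:
--                 cur.append(c)
--         if cur:
--             out.append(''.join(cur))
--     return out
-- ===== Notes on version B (the rewrite author's own statement) =====
-- stated objective: alternative
-- what changed: Replaced A's two staged passes (split every title with str.split() into a list-of-lists, then a nested double loop flattening it) by a hand-written character-level state machine that never calls str.split(): it scans each title's characters once, accumulating the current word in a buffer and flushing it into the flat output on whitespace.
import Mathlib
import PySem

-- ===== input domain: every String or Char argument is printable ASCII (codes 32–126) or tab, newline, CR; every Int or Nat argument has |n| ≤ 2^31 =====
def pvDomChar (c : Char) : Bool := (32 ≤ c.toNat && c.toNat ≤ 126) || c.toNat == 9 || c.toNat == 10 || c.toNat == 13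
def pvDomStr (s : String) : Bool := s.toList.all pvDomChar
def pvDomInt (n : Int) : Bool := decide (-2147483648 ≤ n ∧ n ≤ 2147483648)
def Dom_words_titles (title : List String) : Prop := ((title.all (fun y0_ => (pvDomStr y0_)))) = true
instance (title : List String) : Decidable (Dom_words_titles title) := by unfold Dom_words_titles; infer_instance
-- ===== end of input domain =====

-- B replaces A's str.split()+flatten phases by a hand-written character-level scan; objective: alternative.

-- ===== PORT A =====
def words_titles (title : List String) : List String :=
  let title_sep : List (List String) :=
    (PySem.List.pyRange 0 title.length 1).foldl
      (fun acc i => acc ++ [PySem.Str.split₀ (PySem.List.pyGetD title i "")]) []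
  title_sep.foldl (fun acc idx => idx.foldl (fun a j => a ++ [j]) acc) []

-- ===== PORT B =====
-- inner character loop of Source B plus the trailing flush (cur is the current word buffer)
def wtScan : List Char → List Char → List String → List String
  | [], cur, out => if cur.isEmpty then out else out ++ [String.ofList cur]
  | c :: rest, cur, out =>
    if PySem.Chars.isspace c then
      if cur.isEmpty then wtScan rest [] out
      else wtScan rest [] (out ++ [String.ofList cur])
    else wtScan rest (cur ++ [c]) out

def words_titles_alt (title : List String) : List String :=
  title.foldl (fun out t => wtScan t.toList [] out) []

-- ===== PRECONDITION & SPEC =====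
def Spec_words_titles (title : List String) (out : List String) : Prop := out = words_titles_alt title
instance (title : List String) (out : List String) : Decidable (Spec_words_titles title out) := by unfold Spec_words_titles; infer_instance

-- ===== CLAIM (what is proved, stated in full; the proofs are below) =====
def Claim_equal_words_titles : Prop := ∀ (title : List String), Dom_words_titles title → Spec_words_titles title (words_titles title)

-- ===== LEMMAS AND PROOFS =====

-- pointwise congruence for foldl over the same list
theorem pv_foldl_congr {α β : Type} (l : List α) (f g : β → α → β) (b : β)
    (h : ∀ a ∈ l, ∀ x, f x a = g x a) : l.foldl f b = l.foldl g b := by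
  induction l generalizing b with
  | nil => rfl
  | cons x xs ih =>
    rw [List.foldl_cons, List.foldl_cons, h x (by simp)]
    exact ih _ (fun a ha x => h a (by simp [ha]) x)

-- A's index loop builds the map of split₀ over the list
theorem pv_split_phase (title : List String) :
    (PySem.List.pyRange 0 title.length 1).foldl
      (fun acc i => acc ++ [PySem.Str.split₀ (PySem.List.pyGetD title i "")]) []
      = title.map PySem.Str.split₀ := by
  induction title using List.reverseRecOn with
  | nil => simp
  | append_singleton ys y ih =>
    have hlen : ((ys ++ [y]).length : Int) = (ys.length : Int) + 1 := by simp
    rw [hlen, PySem.List.pyRange_one_succ_right (Int.natCast_nonneg _), List.foldl_append]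
    have hcong :
        (PySem.List.pyRange 0 ys.length 1).foldl
          (fun acc i => acc ++ [PySem.Str.split₀ (PySem.List.pyGetD (ys ++ [y]) i "")]) []
        = (PySem.List.pyRange 0 ys.length 1).foldl
          (fun acc i => acc ++ [PySem.Str.split₀ (PySem.List.pyGetD ys i "")]) [] := by
      apply pv_foldl_congr
      intro i hi a
      have hm := (PySem.List.mem_pyRange_one).1 hi
      have h1 : PySem.List.pyGetD (ys ++ [y]) i "" = (ys ++ [y])[i.toNat] :=
        PySem.List.pyGetD_eq_getElem _ _ hm.1 (by simp; omega)
      have h2 : PySem.List.pyGetD ys i "" = ys[i.toNat] :=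
        PySem.List.pyGetD_eq_getElem _ _ hm.1 (by omega)
      have h3 : i.toNat < ys.length := by omega
      rw [h1, h2, List.getElem_append_left h3]
    have hy : PySem.List.pyGetD (ys ++ [y]) (ys.length : Int) "" = y := by
      have := PySem.List.pyGetD_eq_getElem (ys ++ [y]) (i := (ys.length : Int)) ""
        (Int.natCast_nonneg _) (by simp)
      simpa using this
    rw [List.foldl_cons, hcong, ih, hy]
    simp

-- A's flatten phase is foldl-append of the sublists
theorem pv_flatten_phase (ls : List (List String)) (acc : List String) :
    ls.foldl (fun acc idx => idx.foldl (fun a j => a ++ [j]) acc) acc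
      = ls.foldl (fun a idx => a ++ idx) acc := by
  induction ls generalizing acc with
  | nil => rfl
  | cons x xs ih =>
    rw [List.foldl_cons, List.foldl_cons, PySem.List.foldl_append_singleton, ih]

-- split₀.go's accumulator is a reversed prefix of the result
theorem pv_go_acc (cs : List Char) (cur : List Char) (acc : List (List Char)) :
    PySem.Chars.split₀.go cs cur acc = acc.reverse ++ PySem.Chars.split₀.go cs cur [] := by
  induction cs generalizing cur acc with
  | nil => simp [PySem.Chars.split₀.go]; split_ifs <;> simp
  | cons c rest ih =>
    simp only [PySem.Chars.split₀.go]
    split_ifs with h1 h2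
    · exact ih [] acc
    · rw [ih [] (cur.reverse :: acc), ih [] [cur.reverse]]; simp
    · exact ih (c :: cur) acc

-- B's scan of one string appends exactly that string's split₀ words
theorem pv_scan_go (cs : List Char) (cur : List Char) (out : List String) :
    wtScan cs cur out
      = out ++ (PySem.Chars.split₀.go cs cur.reverse []).map String.ofList := by
  induction cs generalizing cur out with
  | nil =>
    simp only [wtScan, PySem.Chars.split₀.go]
    by_cases h : cur.isEmpty <;> simp_all
  | cons c rest ih =>
    simp only [wtScan, PySem.Chars.split₀.go, List.isEmpty_reverse]
    split_ifs with h1 h2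
    · have hc : cur = [] := by simpa using h2
      subst hc
      rw [ih [] out]
      simp
    · rw [ih [] (out ++ [String.ofList cur]),
        pv_go_acc rest [] [cur.reverse.reverse]]
      simp
    · rw [ih (cur ++ [c]) out]
      simp

-- B equals the fold of split₀ over the titles
theorem pv_alt_eq_flatten (title : List String) :
    words_titles_alt title = (title.map PySem.Str.split₀).foldl (fun a idx => a ++ idx) [] := by
  unfold words_titles_alt
  rw [List.foldl_map]
  apply pv_foldl_congr
  intro t _ out
  rw [pv_scan_go]
  rfl

-- ===== VERDICT (by name: the statement is the Claim_ definition above) =====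
theorem words_titles_spec : Claim_equal_words_titles := by
  intro title _
  unfold Spec_words_titles words_titles
  rw [pv_alt_eq_flatten, pv_split_phase, pv_flatten_phase]
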